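-- pv_equiv track=rewrite | github.com/albertpatterson/sudoku-1 | check/check.py | checkCells
-- ===== SOURCE A (Python) =====
-- def checkCells(board, cells):
--   values = set()
--
--   for (col, row) in cells:
--     value = board[row][col]
--     if value in values:
--       return False
--     values.add(value)
--
--   return True
-- ===== SOURCE B (Python) =====
-- def _distinct(vals):
--   if not vals:
--     return True
--   head, rest = vals[0], vals[1:]
--   if any(v == head for v in rest):
--     return False
--   return _distinct(rest)
--
-- def checkCells(board, cells):
--   vals = [board[row][col] for (col, row) in cells]
--   return _distinct(vals)
-- ===== Notes on version B (the rewrite author's own statement) =====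
-- stated objective: alternative
-- what changed: Drops the incremental hash set entirely: gathers all referenced values once and decides distinctness by recursive pairwise comparison (each value compared against all later values).
-- outside the precondition, e.g. on checkCells([[1]], [(0, 0), (0, 0), (5, 5)]): A returns False, B raises IndexError
import Mathlib
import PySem

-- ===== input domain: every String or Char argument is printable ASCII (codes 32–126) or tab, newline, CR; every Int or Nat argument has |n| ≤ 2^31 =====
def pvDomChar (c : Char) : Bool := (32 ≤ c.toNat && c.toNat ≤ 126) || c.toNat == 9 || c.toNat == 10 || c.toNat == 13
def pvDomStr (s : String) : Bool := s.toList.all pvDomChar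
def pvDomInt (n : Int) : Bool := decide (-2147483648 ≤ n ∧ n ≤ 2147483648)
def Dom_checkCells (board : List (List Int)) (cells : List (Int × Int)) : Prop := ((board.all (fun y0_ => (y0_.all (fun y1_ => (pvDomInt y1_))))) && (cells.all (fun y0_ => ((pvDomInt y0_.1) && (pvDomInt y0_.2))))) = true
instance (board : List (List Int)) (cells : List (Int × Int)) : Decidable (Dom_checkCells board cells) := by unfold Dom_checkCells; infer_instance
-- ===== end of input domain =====

-- B gathers the referenced values once and decides distinctness by recursive pairwise
-- comparison of each value against all later ones (no set at all); alternative, not faster.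
-- ===== PORT A =====
-- loop over cells with the incremental 'values' set; early return False on a seen value
def checkCellsGo (board : List (List Int)) : List (Int × Int) → PySem.Set Int → Bool
  | [], _ => true
  | (col, row) :: rest, values =>
    let value := PySem.List.pyGetD (PySem.List.pyGetD board row []) col 0
    if PySem.Set.contains values value then false
    else checkCellsGo board rest (PySem.Set.add values value)

def checkCells (board : List (List Int)) (cells : List (Int × Int)) : Bool :=
  checkCellsGo board cells PySem.Set.empty

-- ===== PORT B =====
-- _distinct: head vs every later value ('any' is the generator any(...)), then recurse on the tail
def pvDistinct : List Int → Bool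
  | [] => true
  | head :: rest =>
    if rest.any (fun v => v == head) then false else pvDistinct rest

def checkCells_alt (board : List (List Int)) (cells : List (Int × Int)) : Bool :=
  let vals := cells.map (fun p => PySem.List.pyGetD (PySem.List.pyGetD board p.2 []) p.1 0)
  pvDistinct vals

-- ===== PRECONDITION & SPEC =====
-- Pre_ excludes cells with an out-of-range (row, col) index, on which Python raises IndexError; when a
-- duplicate value precedes the bad index A still returns False while B (which gathers all values first) raises.
def Pre_checkCells (board : List (List Int)) (cells : List (Int × Int)) : Prop :=
  ∀ p ∈ cells, PySem.Raise.InRange board.length p.2 ∧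
    PySem.Raise.InRange (PySem.List.pyGetD board p.2 []).length p.1

instance (board : List (List Int)) (cells : List (Int × Int)) : Decidable (Pre_checkCells board cells) := by unfold Pre_checkCells; infer_instance

def pvWitness_checkCells : List (List Int) × (List (Int × Int)) := ([[1, 2], [3, 4]], [(0, 0), (1, 1), (0, 1)])

def Spec_checkCells (board : List (List Int)) (cells : List (Int × Int)) (out : Bool) : Prop := out = checkCells_alt board cells
instance (board : List (List Int)) (cells : List (Int × Int)) (out : Bool) : Decidable (Spec_checkCells board cells out) := by unfold Spec_checkCells; infer_instance

-- ===== CLAIM (what is proved, stated in full; the proofs are below) =====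
def Claim_equal_checkCells : Prop := ∀ (board : List (List Int)) (cells : List (Int × Int)), Dom_checkCells board cells → Pre_checkCells board cells → Spec_checkCells board cells (checkCells board cells)

-- ===== LEMMAS AND PROOFS =====

-- A's loop decides Nodup of 'values' extended by the accessed values
theorem checkCellsGo_eq (board : List (List Int)) (cells : List (Int × Int))
    (values : PySem.Set Int) (h : values.Nodup) :
    checkCellsGo board cells values = true ↔
      (values ++ cells.map (fun p => PySem.List.pyGetD (PySem.List.pyGetD board p.2 []) p.1 0)).Nodup := by
  induction cells generalizing values with
  | nil => simp [checkCellsGo, h]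
  | cons p rest ih =>
    obtain ⟨col, row⟩ := p
    simp only [checkCellsGo, List.map_cons]
    set v := PySem.List.pyGetD (PySem.List.pyGetD board row []) col 0 with hv
    by_cases hmem : v ∈ values
    · rw [if_pos (by simpa [PySem.Set.contains_iff] using hmem)]
      have hbad : ¬ (values ++ v :: rest.map (fun p => PySem.List.pyGetD (PySem.List.pyGetD board p.2 []) p.1 0)).Nodup := by
        intro hnd
        have := List.disjoint_of_nodup_append hnd
        exact this hmem (List.mem_cons_self ..)
      simp [hbad]
    · rw [if_neg (by simpa [PySem.Set.contains_iff] using hmem)]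
      rw [PySem.Set.add_of_not_mem hmem]
      rw [ih (values ++ [v]) (by
        simp only [List.nodup_append, h, true_and, List.nodup_cons, List.not_mem_nil,
          not_false_eq_true, List.nodup_nil, and_self]
        intro a ha b hb
        rw [List.mem_singleton] at hb
        subst hb
        exact fun he => hmem (he ▸ ha))]
      simp only [List.append_assoc, List.singleton_append]

-- B's pairwise recursion decides Nodup
theorem pvDistinct_eq_nodup (xs : List Int) : pvDistinct xs = true ↔ xs.Nodup := by
  induction xs with
  | nil => simp [pvDistinct]
  | cons x rest ih =>
    simp only [pvDistinct, List.nodup_cons]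
    by_cases hx : x ∈ rest
    · rw [if_pos (by simp only [List.any_eq_true, beq_iff_eq]; exact ⟨x, hx, rfl⟩)]
      simp [hx]
    · rw [if_neg (by
        simp only [List.any_eq_true, beq_iff_eq, not_exists]
        intro v hv
        obtain ⟨hmem, he⟩ := hv
        exact hx (he ▸ hmem))]
      simp [hx, ih]

-- ===== VERDICT (by name: the statement is the Claim_ definition above) =====
theorem checkCells_spec : Claim_equal_checkCells := by
  intro board cells _ _
  unfold Spec_checkCells checkCells checkCells_alt
  apply Bool.coe_iff_coe.mp
  rw [checkCellsGo_eq board cells PySem.Set.empty (by simp [PySem.Set.empty])]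
  simp only [PySem.Set.empty, List.nil_append]
  exact (pvDistinct_eq_nodup _).symm
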